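-- pv_equiv track=rewrite | github.com/microsoft/muzic | musecoco/evaluation/midi_data_extractor/utils/remigen_process.py | get_bar_ranges
-- ===== SOURCE A (Python) =====
-- from typing import List, Tuple, Union
--
-- def count_token_num(remigen_seq: List[str], token: str, return_indices=False) -> Union[int, Tuple[int, list]]:
--     """
--     Count the number of a specific token in a remigen sequence.
--     Args:
--         remigen_seq: remigen sequence
--         token: token str
--         return_indices: list, containing the indices of the tokens
--
--     Returns:
--         the number of the appearance of the token.
--     """
--     num = 0
--     indices = []
--     for idx, t in enumerate(remigen_seq):
--         if token == t:
--             num += 1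
--             indices.append(idx)
--
--     if return_indices:
--         return num, indices
--     return num
--
-- def count_bar_num(
--     remigen_seq: List[str], bar_token: str = 'b-1', return_bar_token_indices=False
-- ) -> Union[Tuple[int, int], Tuple[int, List, int]]:
--     """
--     Count the number of bars, including the complete bars and a possible incomplete bar.
--     Args:
--         remigen_seq: remigen sequence
--         bar_token: bar token string
--         return_bar_token_indices: bool
--     Returns:
--         num_of_complete_bars: the number of complete bars.
--         num_of_incomplete_bars: the number of incomplete bar (0 or 1).
--                                 If the sequence does not end with 'b-1', it is regarded as an incomplete bar.
--     """
--     result = count_token_num(remigen_seq, bar_token, return_indices=return_bar_token_indices)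
--     if remigen_seq[-1] != bar_token:
--         num_incomplete_bar = 1
--     else:
--         num_incomplete_bar = 0
--     if return_bar_token_indices:
--         return result + (num_incomplete_bar,)
--     return result, num_incomplete_bar
--
-- def get_bar_ranges(remigen_seq: List[str], bar_token: str = 'b-1'):
--     _, bar_token_indices, num_incomplete_bar = count_bar_num(
--         remigen_seq, bar_token=bar_token, return_bar_token_indices=True
--     )
--
--     complete_bar_result = []
--     in_complete_bar_result = []
--
--     begin = 0
--     for end_index in bar_token_indices:
--         complete_bar_result.append((begin, end_index + 1))
--         begin = end_index + 1
--
--     if num_incomplete_bar > 0: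
--         in_complete_bar_result.append((begin, len(remigen_seq)))
--
--     return complete_bar_result, in_complete_bar_result
-- ===== SOURCE B (Python) =====
-- def get_bar_ranges(remigen_seq, bar_token='b-1'):
--     # Recursive divide: repeatedly locate the next bar token and slice it off.
--     tail_incomplete = remigen_seq[-1] != bar_token
--
--     def go(seq, offset):
--         if bar_token in seq:
--             k = seq.index(bar_token)
--             rest, tail_start = go(seq[k + 1:], offset + k + 1)
--             return [(offset, offset + k + 1)] + rest, tail_start
--         return [], offset
--
--     complete, tail_start = go(remigen_seq, 0)
--     incomplete = [(tail_start, len(remigen_seq))] if tail_incomplete else []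
--     return complete, incomplete
-- ===== Notes on version B (the rewrite author's own statement) =====
-- stated objective: alternative
-- what changed: Replaces the single enumerate-all-positions pass plus begin-accumulator pairing loop by a recursive divide: repeatedly find the next bar token with list.index, emit one range, and recurse on the slice after it; the leftover slice start is the incomplete bar.
import Mathlib
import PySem

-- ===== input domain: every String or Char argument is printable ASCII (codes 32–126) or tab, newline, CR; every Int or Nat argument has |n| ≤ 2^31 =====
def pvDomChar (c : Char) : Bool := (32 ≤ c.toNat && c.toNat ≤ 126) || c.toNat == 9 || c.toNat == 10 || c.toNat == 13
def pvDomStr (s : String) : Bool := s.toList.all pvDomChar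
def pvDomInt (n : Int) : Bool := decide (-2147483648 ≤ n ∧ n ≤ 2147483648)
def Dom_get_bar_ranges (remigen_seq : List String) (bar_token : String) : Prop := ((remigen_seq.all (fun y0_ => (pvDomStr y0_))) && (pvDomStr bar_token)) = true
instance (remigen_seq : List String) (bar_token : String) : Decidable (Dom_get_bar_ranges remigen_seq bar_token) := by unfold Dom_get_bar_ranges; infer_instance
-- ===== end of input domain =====

-- B replaces the enumerate-and-pair pass by a recursive divide that slices off one bar at a time (objective: alternative).

-- ===== PORT A =====
-- count_token_num, specialized to the only call here (return_indices=True): returns (num, indices)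
def count_token_num (remigen_seq : List String) (token : String) : Int × List Int :=
  (PySem.List.enumerate remigen_seq).foldl
    (fun st p => if token == p.2 then (st.1 + 1, st.2 ++ [p.1]) else st) (0, [])

-- count_bar_num with return_bar_token_indices=True: (num, indices, num_incomplete_bar)
-- remigen_seq[-1] via PySem.List.pyGet?; none (IndexError on empty input) is excluded by Pre_
def count_bar_num (remigen_seq : List String) (bar_token : String) : Int × List Int × Int :=
  let result := count_token_num remigen_seq bar_token
  let num_incomplete_bar : Int := if PySem.List.pyGet? remigen_seq (-1) ≠ some bar_token then 1 else 0
  (result.1, result.2, num_incomplete_bar)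

def get_bar_ranges (remigen_seq : List String) (bar_token : String) : (List (Int × Int)) × (List (Int × Int)) :=
  let r := count_bar_num remigen_seq bar_token
  let bar_token_indices := r.2.1
  let num_incomplete_bar := r.2.2
  -- begin = 0; for end_index in bar_token_indices: append (begin, end+1); begin = end+1
  let st := bar_token_indices.foldl
    (fun (st : Int × List (Int × Int)) e => (e + 1, st.2 ++ [(st.1, e + 1)])) (0, [])
  let in_complete_bar_result := if num_incomplete_bar > 0 then [(st.1, (remigen_seq.length : Int))] else []
  (st.2, in_complete_bar_result)

-- ===== PORT B =====
-- go(seq, offset): 'if bar_token in seq: k = seq.index(bar_token)' is the match on PySem.List.index?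
-- (some k ↔ the membership test succeeds and k is the found index); seq[k+1:] is PySem.List.slice.
def get_bar_ranges_go (bar_token : String) (seq : List String) (offset : Int) :
    List (Int × Int) × Int :=
  match h : PySem.List.index? seq bar_token with
  | some k =>
      let r := get_bar_ranges_go bar_token
        (PySem.List.slice seq (some ((k : Int) + 1)) none) (offset + k + 1)
      ((offset, offset + k + 1) :: r.1, r.2)
  | none => ([], offset)
termination_by seq.length
decreasing_by
  obtain ⟨pre, suf, hseq, hlen, -⟩ := (PySem.List.index?_eq_some_iff _ _ _).1 h
  have : PySem.List.slice seq (some ((k : Int) + 1)) none = seq.drop (k + 1) := by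
    have := PySem.List.slice_from_natCast (xs := seq) (a := k + 1)
    push_cast at this ⊢
    exact this
  rw [this]
  subst hseq; simp [List.length_drop]

def get_bar_ranges_alt (remigen_seq : List String) (bar_token : String) : (List (Int × Int)) × (List (Int × Int)) :=
  -- remigen_seq[-1] via PySem.List.pyGet? (IndexError on empty input, excluded by Pre_)
  let tail_incomplete := PySem.List.pyGet? remigen_seq (-1) ≠ some bar_token
  let r := get_bar_ranges_go bar_token remigen_seq 0
  let incomplete := if tail_incomplete then [(r.2, (remigen_seq.length : Int))] else []
  (r.1, incomplete)

-- ===== PRECONDITION & SPEC =====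
-- Python A evaluates remigen_seq[-1] and raises IndexError on the empty list; Pre_ excludes exactly that.
def Pre_get_bar_ranges (remigen_seq : List String) (bar_token : String) : Prop := remigen_seq ≠ []
instance (remigen_seq : List String) (bar_token : String) : Decidable (Pre_get_bar_ranges remigen_seq bar_token) := by unfold Pre_get_bar_ranges; infer_instance
def pvWitness_get_bar_ranges : List String × String := (["n-60", "b-1", "n-62"], "b-1")

def Spec_get_bar_ranges (remigen_seq : List String) (bar_token : String) (out : (List (Int × Int)) × (List (Int × Int))) : Prop := out = get_bar_ranges_alt remigen_seq bar_token
instance (remigen_seq : List String) (bar_token : String) (out : (List (Int × Int)) × (List (Int × Int))) : Decidable (Spec_get_bar_ranges remigen_seq bar_token out) := by unfold Spec_get_bar_ranges; infer_instance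

-- ===== CLAIM (what is proved, stated in full; the proofs are below) =====
def Claim_equal_get_bar_ranges : Prop := ∀ (remigen_seq : List String) (bar_token : String), Dom_get_bar_ranges remigen_seq bar_token → Pre_get_bar_ranges remigen_seq bar_token → Spec_get_bar_ranges remigen_seq bar_token (get_bar_ranges remigen_seq bar_token)

-- ===== LEMMAS AND PROOFS =====

-- the Int positions of bar_token in seq, as A's enumerate pass collects them (start 0)
def barPos (bar : String) (seq : List String) : List Int :=
  (PySem.List.enumerate seq).filterMap (fun p => if bar == p.2 then some p.1 else none)

-- A's count_token_num fold: the indices component is barPos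
theorem ctn_snd (bt : String) (seq : List String) :
    (count_token_num seq bt).2 = barPos bt seq := by
  unfold count_token_num barPos
  generalize PySem.List.enumerate seq = l
  suffices h : ∀ (n0 : Int) (i0 : List Int),
      (l.foldl (fun st p => if bt == p.2 then (st.1 + 1, st.2 ++ [p.1]) else st) (n0, i0)).2
        = i0 ++ l.filterMap (fun p => if bt == p.2 then some p.1 else none) by
    simpa using h 0 []
  induction l with
  | nil => simp
  | cons h t ih =>
    intro n0 i0
    simp only [List.foldl_cons, List.filterMap_cons]
    by_cases hc : (bt == h.2) = true
    · rw [if_pos hc, if_pos hc, ih]; simp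
    · rw [if_neg hc, if_neg hc, ih]

-- A's pairing loop in closed form
theorem pair_loop (I : List Int) (b : Int) (acc : List (Int × Int)) :
    I.foldl (fun (st : Int × List (Int × Int)) e => (e + 1, st.2 ++ [(st.1, e + 1)])) (b, acc)
      = ((I.map (· + 1)).getLastD b, acc ++ List.zip (b :: I.map (· + 1)) (I.map (· + 1))) := by
  induction I generalizing b acc with
  | nil => simp
  | cons e t ih =>
    simp only [List.foldl_cons, List.map_cons, List.zip_cons_cons, List.getLastD_cons, ih]
    simp

-- enumerate start shift: positions collected from start s are the start-0 positions shifted by s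
theorem pos_shift (bar : String) (seq : List String) (s : Int) :
    (PySem.List.enumerate seq s).filterMap (fun p => if bar == p.2 then some p.1 else none)
      = ((PySem.List.enumerate seq 0).filterMap (fun p => if bar == p.2 then some p.1 else none)).map (· + s) := by
  induction seq generalizing s with
  | nil => simp [PySem.List.enumerate_nil]
  | cons x t ih =>
    rw [PySem.List.enumerate_cons, PySem.List.enumerate_cons, zero_add]
    by_cases hc : (bar == x) = true
    · simp only [List.filterMap_cons, hc, if_true]
      rw [ih (s + 1), ih 1]
      simp only [List.map_cons, List.map_map, zero_add]
      congr 1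
      apply List.map_congr_left; intro a _; simp [Function.comp]; ring
    · simp only [List.filterMap_cons, hc, Bool.false_eq_true, if_false]
      rw [ih (s + 1), ih 1]
      simp only [List.map_map]
      apply List.map_congr_left; intro a _; simp [Function.comp]; ring

theorem barPos_of_not_mem (bar : String) (seq : List String) (h : bar ∉ seq) :
    barPos bar seq = [] := by
  unfold barPos
  induction seq with
  | nil => simp [PySem.List.enumerate_nil]
  | cons x t ih =>
    simp only [List.mem_cons, not_or] at h
    have hx : (bar == x) = false := beq_eq_false_iff_ne.mpr h.1
    rw [PySem.List.enumerate_cons]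
    simp only [List.filterMap_cons, hx, Bool.false_eq_true, if_false]
    rw [pos_shift, ih h.2]
    simp

-- splitting barPos at the first occurrence
theorem barPos_split (bar : String) (seq : List String) (k : Nat)
    (h : PySem.List.index? seq bar = some k) :
    barPos bar seq = (k : Int) :: (barPos bar (seq.drop (k + 1))).map (· + ((k : Int) + 1)) := by
  obtain ⟨pre, suf, hseq, hlen, hpre⟩ := (PySem.List.index?_eq_some_iff _ _ _).1 h
  subst hseq
  have hdrop : (pre ++ bar :: suf).drop (k + 1) = suf := by
    have h2 : pre ++ bar :: suf = (pre ++ [bar]) ++ suf := by simp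
    rw [h2, List.drop_append_of_le_length (by simp [hlen])]
    simp [hlen]
  rw [hdrop]
  unfold barPos
  rw [PySem.List.enumerate_append, List.filterMap_append]
  have h1 : (PySem.List.enumerate pre 0).filterMap
      (fun p => if bar == p.2 then some p.1 else none) = [] := by
    have h0 := barPos_of_not_mem bar pre hpre
    unfold barPos at h0
    exact h0
  rw [h1, List.nil_append, PySem.List.enumerate_cons, List.filterMap_cons,
    if_pos (by simp), pos_shift]
  simp [hlen]

-- B's recursion in closed form, over the boundary list built from barPos
theorem go_spec (bar : String) : ∀ (n : Nat) (seq : List String), seq.length = n → ∀ (off : Int),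
    get_bar_ranges_go bar seq off
      = (List.zip (off :: (barPos bar seq).map (fun p => off + p + 1))
                  ((barPos bar seq).map (fun p => off + p + 1)),
         ((barPos bar seq).map (fun p => off + p + 1)).getLastD off) := by
  intro n
  induction n using Nat.strong_induction_on with
  | _ n ih =>
    intro seq hlen off
    rw [get_bar_ranges_go]
    split
    next k h =>
      have hslice : PySem.List.slice seq (some ((k : Int) + 1)) none = seq.drop (k + 1) := by
        have hs := PySem.List.slice_from_natCast (xs := seq) (a := k + 1)
        push_cast at hs ⊢
        exact hs
      obtain ⟨hk, -, -⟩ := PySem.List.getElem_of_index?_eq_some h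
      rw [hslice, ih ((seq.drop (k + 1)).length) (by simp [List.length_drop]; omega)
        (seq.drop (k + 1)) rfl (off + k + 1)]
      rw [barPos_split bar seq k h]
      simp only [List.map_cons, List.map_map]
      have hmap : (barPos bar (seq.drop (k + 1))).map ((fun p => off + p + 1) ∘ (· + ((k : Int) + 1)))
          = (barPos bar (seq.drop (k + 1))).map (fun p => (off + k + 1) + p + 1) := by
        apply List.map_congr_left; intro a _; simp [Function.comp]; ring
      rw [hmap]
      rw [List.zip_cons_cons, List.getLastD_cons]
    next h =>
      rw [barPos_of_not_mem bar seq ((PySem.List.index?_eq_none_iff (xs := seq) (v := bar)).1 h)]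
      simp

-- ===== VERDICT (by name: the statement is the Claim_ definition above) =====
theorem get_bar_ranges_spec : Claim_equal_get_bar_ranges := by
  intro s bt _ _
  show get_bar_ranges s bt = get_bar_ranges_alt s bt
  unfold get_bar_ranges get_bar_ranges_alt count_bar_num
  dsimp only
  rw [ctn_snd, pair_loop, go_spec bt s.length s rfl 0]
  have hm : (barPos bt s).map (· + 1) = (barPos bt s).map (fun p => 0 + p + 1) := by
    apply List.map_congr_left; intro a _; ring
  rw [hm]
  by_cases hc : PySem.List.pyGet? s (-1) ≠ some bt
  · simp [hc]
  · simp [hc]
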